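-- pv_equiv track=rewrite | github.com/trinhtuanphong123/community_detetion | src/community/detection.py | _filter_small_communities
-- ===== SOURCE A (Python) =====
-- from typing import Dict, List
--
-- def _filter_small_communities(
--     labels: Dict[int, int],
--     min_size: int,
-- ) -> Dict[int, int]:
--     """
--     Reassign nodes in communities smaller than min_size to community -1.
--     Does not renumber the remaining community IDs.
--     """
--     from collections import Counter
--     counts = Counter(labels.values())
--     return {
--         node: (cid if counts[cid] >= min_size else -1)
--         for node, cid in labels.items()
--     }
-- ===== SOURCE B (Python) =====
-- from typing import Dict
--
--
-- def _filter_small_communities(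
--     labels: Dict[int, int],
--     min_size: int,
-- ) -> Dict[int, int]:
--     """Sort-then-scan instead of hash counting: sort the community ids,
--     walk the sorted list run by run, record ids whose run reaches
--     min_size, then relabel each node by membership in that set."""
--     vals = sorted(labels.values())
--     big = set()
--     i = 0
--     n = len(vals)
--     while i < n:
--         j = i + 1
--         while j < n and vals[j] == vals[i]:
--             j += 1
--         if j - i >= min_size:
--             big.add(vals[i])
--         i = j
--     return {node: (cid if cid in big else -1) for node, cid in labels.items()}
-- ===== Notes on version B (the rewrite author's own statement) =====
-- stated objective: alternative
-- what changed: Replaces A's hash-table counting (Counter + per-node count lookup) by sort-then-run-scan: sort the community ids, walk the sorted list run by run to collect the ids of large-enough runs, then relabel each node by membership in that set.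
import Mathlib
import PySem

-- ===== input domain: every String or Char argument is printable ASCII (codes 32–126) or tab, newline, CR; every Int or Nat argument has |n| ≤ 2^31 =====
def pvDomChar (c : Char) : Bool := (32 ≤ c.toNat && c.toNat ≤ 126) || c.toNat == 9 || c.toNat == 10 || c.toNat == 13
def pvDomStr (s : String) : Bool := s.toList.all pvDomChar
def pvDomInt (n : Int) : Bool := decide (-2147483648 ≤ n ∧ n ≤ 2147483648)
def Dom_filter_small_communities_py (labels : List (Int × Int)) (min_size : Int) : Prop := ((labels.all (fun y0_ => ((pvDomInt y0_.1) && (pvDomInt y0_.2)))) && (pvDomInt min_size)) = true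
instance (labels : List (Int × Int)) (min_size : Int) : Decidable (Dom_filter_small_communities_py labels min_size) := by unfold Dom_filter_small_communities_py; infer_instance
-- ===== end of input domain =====

-- B replaces A's hash counting (Counter) by sort-then-run-scan: sort the community ids, walk the
-- sorted list run by run collecting ids of large-enough runs, then relabel by membership.
-- 'alternative': a different algorithm of comparable cost, not claimed faster.

-- ===== PORT A =====
-- counts = Counter(labels.values()); {node: (cid if counts[cid] >= min_size else -1) for node, cid in labels.items()}
def filter_small_communities_py (labels : List (Int × Int)) (min_size : Int) : List (Int × Int) :=
  let counts : PySem.Dict Int Int := PySem.Dict.counter (labels.map Prod.snd)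
  (labels.foldl
    (fun d p => d.insert p.1 (if counts.getD p.2 0 ≥ min_size then p.2 else -1))
    PySem.Dict.empty).items

-- ===== PORT B =====
-- the while loop over the sorted values: each outer step consumes one run (the inner
-- 'while vals[j] == vals[i]' is the takeWhile/dropWhile split) and records vals[i] if the run is large
def runScan (vals : List Int) (min_size : Int) (big : PySem.Set Int) : PySem.Set Int :=
  match vals with
  | [] => big
  | v :: rest =>
    let run := rest.takeWhile (fun c => c == v)
    let tail := rest.dropWhile (fun c => c == v)
    runScan tail min_size (if ((1 + run.length : Int)) ≥ min_size then big.add v else big)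
termination_by vals.length
decreasing_by
  have := List.length_dropWhile_le (fun c => c == v) rest
  simp only [List.length_cons]
  omega

-- vals = sorted(labels.values()); big = run scan; {node: (cid if cid in big else -1) …}
def filter_small_communities_py_alt (labels : List (Int × Int)) (min_size : Int) : List (Int × Int) :=
  let vals := PySem.List.sorted (labels.map Prod.snd) (fun x => x) false
  let big := runScan vals min_size PySem.Set.empty
  (labels.foldl
    (fun d p => d.insert p.1 (if p.2 ∈ big then p.2 else -1))
    PySem.Dict.empty).items

-- ===== PRECONDITION & SPEC =====
def Spec_filter_small_communities_py (labels : List (Int × Int)) (min_size : Int) (out : List (Int × Int)) : Prop := out = filter_small_communities_py_alt labels min_size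
instance (labels : List (Int × Int)) (min_size : Int) (out : List (Int × Int)) : Decidable (Spec_filter_small_communities_py labels min_size out) := by unfold Spec_filter_small_communities_py; infer_instance

-- ===== CLAIM (what is proved, stated in full; the proofs are below) =====
def Claim_equal_filter_small_communities_py : Prop := ∀ (labels : List (Int × Int)) (min_size : Int), Dom_filter_small_communities_py labels min_size → Spec_filter_small_communities_py labels min_size (filter_small_communities_py labels min_size)

-- ===== LEMMAS AND PROOFS =====

-- two insert-loops over the same pairs agree if the inserted values agree on members
theorem foldl_insert_congr (l : List (Int × Int)) (vA vB : Int × Int → Int)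
    (d : PySem.Dict Int Int) (h : ∀ p ∈ l, vA p = vB p) :
    l.foldl (fun d p => d.insert p.1 (vA p)) d = l.foldl (fun d p => d.insert p.1 (vB p)) d := by
  induction l generalizing d with
  | nil => rfl
  | cons p l ih =>
    simp only [List.foldl_cons]
    rw [h p (List.mem_cons_self), ih _ (fun q hq => h q (List.mem_cons_of_mem _ hq))]

-- in an ascending list whose elements are all ≥ v, dropping the leading v-run removes every v
theorem not_mem_dropWhile (v : Int) (l : List Int) (hp : l.Pairwise (· ≤ ·))
    (hge : ∀ x ∈ l, v ≤ x) : v ∉ l.dropWhile (fun c => c == v) := by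
  induction l with
  | nil => simp
  | cons x xs ih =>
    by_cases hx : x = v
    · subst hx
      simp only [List.dropWhile_cons, beq_self_eq_true, if_pos]
      exact ih hp.of_cons (fun y hy => hge y (List.mem_cons_of_mem _ hy))
    · have hxv : v < x := lt_of_le_of_ne (hge x List.mem_cons_self) (Ne.symm hx)
      simp only [List.dropWhile_cons, beq_iff_eq, hx, ite_false]
      intro hmem
      rcases List.mem_cons.mp hmem with h | h
      · exact hx h.symm
      · have := (List.pairwise_cons.mp hp).1 v h
        omega

-- the run scan collects exactly: old members, plus ids whose multiplicity reaches min_size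
theorem mem_runScan (min_size : Int) (c : Int) :
    ∀ (vals : List Int) (big : PySem.Set Int), vals.Pairwise (· ≤ ·) →
    (c ∈ runScan vals min_size big ↔ c ∈ big ∨ (c ∈ vals ∧ ((vals.count c : Int) ≥ min_size))) := by
  intro vals big
  induction vals, big using runScan.induct min_size with
  | case1 big => intro _; simp [runScan]
  | case2 big v rest run tail ih =>
    intro hp
    simp only [dite_eq_ite] at ih
    have hsplit : run ++ tail = rest := List.takeWhile_append_dropWhile
    have hrun : ∀ x ∈ run, x = v := by
      intro x hx
      have := List.mem_takeWhile_imp hx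
      simpa using this
    have htail_sub : tail.Sublist rest := List.dropWhile_sublist _
    have hptail : tail.Pairwise (· ≤ ·) := hp.of_cons.sublist htail_sub
    have hvnot : v ∉ tail :=
      not_mem_dropWhile v rest hp.of_cons
        (fun x hx => (List.pairwise_cons.mp hp).1 x hx)
    have hcount_v : ((v :: rest).count v : Int) = 1 + run.length := by
      have h1 : rest.count v = run.count v + tail.count v := by
        rw [← hsplit, List.count_append]
      have h2 : run.count v = run.length := by
        rw [List.count_eq_length]
        intro b hb; exact ((hrun b hb).symm ▸ rfl)
      have h3 : tail.count v = 0 := List.count_eq_zero.mpr hvnot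
      simp [h1, h2, h3]
      omega
    rw [show runScan (v :: rest) min_size big
          = runScan tail min_size (if ((1 + run.length : Int)) ≥ min_size then big.add v else big) by
        rw [runScan], ih hptail]
    by_cases hc : c = v
    · subst hc
      have hnot_tail : ¬ (c ∈ tail ∧ ((tail.count c : Int) ≥ min_size)) := fun h => hvnot h.1
      constructor
      · rintro (h | h)
        · split_ifs at h with hbig
          · rcases (PySem.Set.mem_add _ _ _).mp h with h | h
            · exact Or.inl h
            · exact Or.inr ⟨List.mem_cons_self, by rw [hcount_v]; omega⟩
          · exact Or.inl h
        · exact absurd h hnot_tail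
      · rintro (h | ⟨_, hcnt⟩)
        · left; split_ifs with hbig
          · exact (PySem.Set.mem_add _ _ _).mpr (Or.inl h)
          · exact h
        · left
          rw [hcount_v] at hcnt
          rw [if_pos hcnt]
          exact (PySem.Set.mem_add _ _ _).mpr (Or.inr rfl)
    · have hbig' : (c ∈ (if ((1 + run.length : Int)) ≥ min_size then big.add v else big)) ↔ c ∈ big := by
        split_ifs with hbig
        · rw [PySem.Set.mem_add]; simp [hc]
        · exact Iff.rfl
      have hmem : c ∈ tail ↔ c ∈ (v :: rest) := by
        constructor
        · intro h; exact List.mem_cons_of_mem _ (hsplit ▸ List.mem_append_right run h)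
        · intro h
          rcases List.mem_cons.mp h with h | h
          · exact absurd h hc
          · rw [← hsplit] at h
            rcases List.mem_append.mp h with h | h
            · exact absurd (hrun c h) hc
            · exact h
      have hcnt : tail.count c = (v :: rest).count c := by
        have h1 : rest.count c = run.count c + tail.count c := by
          rw [← hsplit, List.count_append]
        have h2 : run.count c = 0 := List.count_eq_zero.mpr (fun h => hc (hrun c h))
        simp [List.count_cons, h1, h2]
        exact fun h => hc h.symm
      rw [hbig', hmem, hcnt]

-- ===== VERDICT (by name: the statement is the Claim_ definition above) =====
theorem filter_small_communities_py_spec : Claim_equal_filter_small_communities_py := by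
  intro labels min_size _
  unfold Spec_filter_small_communities_py filter_small_communities_py filter_small_communities_py_alt
  simp only []
  congr 1
  apply foldl_insert_congr
  intro p hp
  set vals := PySem.List.sorted (labels.map Prod.snd) (fun x => x) false with hv
  have hperm : vals.Perm (labels.map Prod.snd) := PySem.List.sorted_perm _ _ _
  have hsorted : vals.Pairwise (· ≤ ·) := by
    have := PySem.List.sorted_pairwise (labels.map Prod.snd) (fun x => x)
    simpa using this
  have hmemv : p.2 ∈ vals := hperm.mem_iff.mpr (List.mem_map.mpr ⟨p, hp, rfl⟩)
  rw [PySem.Dict.getD_counter]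
  have hms := mem_runScan min_size p.2 vals PySem.Set.empty hsorted
  have hcnt : vals.count p.2 = (labels.map Prod.snd).count p.2 := hperm.count_eq _
  by_cases hge : (((labels.map Prod.snd).count p.2 : Int) ≥ min_size)
  · rw [if_pos hge, if_pos (hms.mpr (Or.inr ⟨hmemv, by rw [hcnt]; exact hge⟩))]
  · rw [if_neg hge, if_neg]
    intro h
    rcases hms.mp h with h | ⟨_, h⟩
    · simp [PySem.Set.empty] at h
    · rw [hcnt] at h; exact hge h
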